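-- pv_equiv track=rewrite | github.com/BentleySystems/MicroStationPython | MSPythonSamples/DgnElements/TagsExamplePlaceTagFromText.py | isDoubleString
-- ===== SOURCE A (Python) =====
-- def isDoubleString(text):
--     """
--     Check if the given text represents a valid double-precision floating-point number.
--     This function verifies if the input string `text` can be interpreted as a double-precision
--     floating-point number. It checks for the presence of digits, a single decimal point,
--     and optionally an exponent part (indicated by 'e' or 'E').
--
--     :param text: The input string to be checked.
--     :type text: str
--
--     :return: True if the string represents a valid double-precision floating-point number, False otherwise.
--     :rtype: bool
--     """
--     eCount = 0
--     dotCount = 0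
--     for char in text:
--         if char in ['e', 'E']:
--             eCount += 1
--             if eCount > 1:
--                 return False
--         elif char == '.':
--             dotCount += 1
--             if dotCount > 1:
--                 return False
--         elif char in ['+', '-']:
--             continue
--         elif not char.isdigit():
--             return False
--     return True
-- ===== SOURCE B (Python) =====
-- def isDoubleString(text):
--     if text.count('e') + text.count('E') > 1:
--         return False
--     if text.count('.') > 1:
--         return False
--     return all(c.isdigit() or c in 'eE.+-' for c in text)
-- ===== Notes on version B (the rewrite author's own statement) =====
-- stated objective: simpler
-- what changed: Replaces the single early-exiting loop that maintains two mutable counters with independent whole-string count() checks for the exponent markers and the decimal point followed by one all() pass over an explicit allowed-character set.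
import Mathlib
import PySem

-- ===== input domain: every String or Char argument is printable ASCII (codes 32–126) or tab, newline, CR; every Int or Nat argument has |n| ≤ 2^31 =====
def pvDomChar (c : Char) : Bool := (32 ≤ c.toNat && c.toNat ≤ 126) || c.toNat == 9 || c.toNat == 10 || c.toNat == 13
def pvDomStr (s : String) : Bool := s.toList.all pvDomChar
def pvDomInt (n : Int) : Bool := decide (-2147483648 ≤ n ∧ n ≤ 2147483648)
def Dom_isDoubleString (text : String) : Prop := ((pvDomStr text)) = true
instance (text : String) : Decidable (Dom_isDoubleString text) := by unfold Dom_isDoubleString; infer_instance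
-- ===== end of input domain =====

-- B replaces A's single early-exiting loop with two mutable counters by independent
-- whole-string count() checks plus one all() pass over an explicit allowed-character set (simpler).


-- ===== PORT A =====
-- the for-loop with early returns, carrying the two mutable counters as state
def isDoubleStringGo (l : List Char) (eCount dotCount : Int) : Bool :=
  match l with
  | [] => true
  | c :: rest =>
    if c = 'e' ∨ c = 'E' then
      if eCount + 1 > 1 then false else isDoubleStringGo rest (eCount + 1) dotCount
    else if c = '.' then
      if dotCount + 1 > 1 then false else isDoubleStringGo rest eCount (dotCount + 1)
    else if c = '+' ∨ c = '-' then isDoubleStringGo rest eCount dotCount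
    else if ¬ (PySem.Chars.isdigit c = true) then false
    else isDoubleStringGo rest eCount dotCount

def isDoubleString (text : String) : Bool := isDoubleStringGo text.toList 0 0

-- ===== PORT B =====
def isDoubleString_alt (text : String) : Bool :=
  if PySem.Str.count text "e" + PySem.Str.count text "E" > 1 then false
  else if PySem.Str.count text "." > 1 then false
  else text.toList.all (fun c => PySem.Chars.isdigit c || PySem.Chars.isIn [c] "eE.+-".toList)

-- ===== PRECONDITION & SPEC =====
def Spec_isDoubleString (text : String) (out : Bool) : Prop := out = isDoubleString_alt text
instance (text : String) (out : Bool) : Decidable (Spec_isDoubleString text out) := by unfold Spec_isDoubleString; infer_instance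

-- ===== CLAIM (what is proved, stated in full; the proofs are below) =====
def Claim_equal_isDoubleString : Prop := ∀ (text : String), Dom_isDoubleString text → Spec_isDoubleString text (isDoubleString text)

-- ===== LEMMAS AND PROOFS =====

-- single-character Chars.count is List.count
theorem chars_count_go_single (c : Char) :
    ∀ (fuel : Nat) (l : List Char) (acc : Nat), l.length ≤ fuel →
      PySem.Chars.count.go [c] fuel l acc = acc + l.count c := by
  intro fuel
  induction fuel with
  | zero =>
    intro l acc h
    cases l with
    | nil => simp [PySem.Chars.count.go]
    | cons a t => simp at h
  | succ n ih =>
    intro l acc h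
    cases l with
    | nil => simp [PySem.Chars.count.go]
    | cons a t =>
      simp only [PySem.Chars.count.go]
      by_cases hc : c = a
      · subst hc
        simp only [List.isPrefixOf]
        simp only [beq_self_eq_true, Bool.true_and, if_pos]
        rw [show List.length [c] = 1 from rfl]
        simp only [List.drop_one, List.tail_cons]
        rw [ih t (acc + 1) (by simpa using h)]
        simp
        omega
      · have hpre : List.isPrefixOf [c] (a :: t) = false := by
          simp only [List.isPrefixOf, Bool.and_true,
            beq_eq_false_iff_ne, ne_eq]
          exact hc
        rw [hpre, if_neg (by decide : ¬ (false = true))]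
        rw [ih t acc (by simpa using h)]
        have hac : ¬ a = c := fun h' => hc h'.symm
        simp [hac]

theorem chars_count_single (s : List Char) (c : Char) :
    PySem.Chars.count s [c] = s.count c := by
  simp [PySem.Chars.count, chars_count_go_single c s.length s 0 le_rfl]

-- the allowed-character test of B, rewritten to a plain disjunction
theorem isIn_singleton_special (c : Char) :
    (PySem.Chars.isdigit c || PySem.Chars.isIn [c] "eE.+-".toList)
      = (PySem.Chars.isdigit c || (c = 'e' ∨ c = 'E' ∨ c = '.' ∨ c = '+' ∨ c = '-')) := by
  congr 1
  rw [Bool.eq_iff_iff, PySem.Chars.isIn_iff_infix, decide_eq_true_iff]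
  constructor
  · intro h
    have := h.sublist.subset (List.mem_singleton_self c)
    simpa using this
  · intro h
    have hm : c ∈ "eE.+-".toList := by
      rcases h with h | h | h | h | h <;> subst h <;> decide
    rcases List.mem_iff_append.mp hm with ⟨s1, s2, hs⟩
    exact ⟨s1, s2, by rw [hs]; simp⟩

-- loop invariant: A's loop agrees with the counts-plus-scan characterisation
theorem isDoubleStringGo_eq (l : List Char) : ∀ (e d : Int), 0 ≤ e → e ≤ 1 → 0 ≤ d → d ≤ 1 →
    isDoubleStringGo l e d =
      (decide (e + l.count 'e' + l.count 'E' ≤ 1) &&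
       decide (d + l.count '.' ≤ 1) &&
       l.all (fun c => PySem.Chars.isdigit c ||
         (c = 'e' ∨ c = 'E' ∨ c = '.' ∨ c = '+' ∨ c = '-'))) := by
  induction l with
  | nil =>
    intro e d he0 he1 hd0 hd1
    simp [isDoubleStringGo]
    omega
  | cons c rest ih =>
    intro e d he0 he1 hd0 hd1
    by_cases hcE : c = 'e' ∨ c = 'E'
    · have hdotne : c ≠ '.' := by rcases hcE with h | h <;> subst h <;> decide
      have hcounts : (c :: rest).count 'e' + (c :: rest).count 'E'
          = rest.count 'e' + rest.count 'E' + 1 := by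
        rcases hcE with h | h <;> subst h <;> simp <;> omega
      have hdotcnt : (c :: rest).count '.' = rest.count '.' := by
        simp [Ne.symm hdotne, hdotne]
      simp only [isDoubleStringGo, if_pos hcE]
      by_cases hgt : e + 1 > 1
      · rw [if_pos hgt]
        symm
        simp only [Bool.and_eq_false_iff]
        left; left
        rw [decide_eq_false_iff_not]
        intro hle
        have := hcounts
        omega
      · rw [if_neg hgt, ih (e + 1) d (by omega) (by omega) hd0 hd1]
        have hPc : (PySem.Chars.isdigit c ||
            decide (c = 'e' ∨ c = 'E' ∨ c = '.' ∨ c = '+' ∨ c = '-')) = true := by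
          rcases hcE with h | h <;> subst h <;> decide
        rw [List.all_cons, hPc, Bool.true_and, hdotcnt]
        congr 1
        congr 1
        rw [decide_eq_decide]
        have := hcounts
        omega
    · have hce : (c :: rest).count 'e' = rest.count 'e' := by
        have : c ≠ 'e' := fun h => hcE (Or.inl h)
        simp [List.count_cons, Ne.symm this, this]
      have hcE2 : (c :: rest).count 'E' = rest.count 'E' := by
        have : c ≠ 'E' := fun h => hcE (Or.inr h)
        simp [List.count_cons, Ne.symm this, this]
      simp only [isDoubleStringGo, if_neg hcE, hce, hcE2]
      by_cases hdotc : c = '.'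
      · subst hdotc
        rw [if_pos rfl]
        have hdotcnt : (('.' : Char) :: rest).count '.' = rest.count '.' + 1 := by
          simp [List.count_cons]
        by_cases hgt : d + 1 > 1
        · rw [if_pos hgt]
          symm
          simp only [Bool.and_eq_false_iff]
          left; right
          rw [decide_eq_false_iff_not]
          intro hle
          have := hdotcnt
          omega
        · rw [if_neg hgt, ih e (d + 1) he0 he1 (by omega) (by omega)]
          rw [List.all_cons,
            show (PySem.Chars.isdigit '.' ||
              decide (('.':Char) = 'e' ∨ ('.':Char) = 'E' ∨ ('.':Char) = '.' ∨
                ('.':Char) = '+' ∨ ('.':Char) = '-')) = true from by decide,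
            Bool.true_and, hdotcnt]
          congr 1
          congr 1
          rw [decide_eq_decide]
          omega
      · have hdotcnt : (c :: rest).count '.' = rest.count '.' := by
          simp [List.count_cons, Ne.symm hdotc, hdotc]
        rw [if_neg hdotc, hdotcnt]
        by_cases hsign : c = '+' ∨ c = '-'
        · rw [if_pos hsign, ih e d he0 he1 hd0 hd1]
          have hPc : (PySem.Chars.isdigit c ||
              decide (c = 'e' ∨ c = 'E' ∨ c = '.' ∨ c = '+' ∨ c = '-')) = true := by
            rcases hsign with h | h <;> subst h <;> decide
          rw [List.all_cons, hPc, Bool.true_and]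
        · rw [if_neg hsign]
          by_cases hdig : PySem.Chars.isdigit c = true
          · rw [if_neg (by simp [hdig]), ih e d he0 he1 hd0 hd1]
            rw [List.all_cons, show (PySem.Chars.isdigit c ||
              decide (c = 'e' ∨ c = 'E' ∨ c = '.' ∨ c = '+' ∨ c = '-')) = true from by
                simp [hdig], Bool.true_and]
          · rw [if_pos (by simp [hdig])]
            symm
            simp only [Bool.and_eq_false_iff]
            right
            rw [List.all_cons]
            have hPc : (PySem.Chars.isdigit c ||
                decide (c = 'e' ∨ c = 'E' ∨ c = '.' ∨ c = '+' ∨ c = '-')) = false := by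
              simp only [Bool.or_eq_false_iff, decide_eq_false_iff_not]
              refine ⟨by simpa using hdig, by tauto⟩
            rw [hPc, Bool.false_and]

-- ===== VERDICT (by name: the statement is the Claim_ definition above) =====
theorem isDoubleString_spec : Claim_equal_isDoubleString := by
  intro text _
  unfold Spec_isDoubleString isDoubleString isDoubleString_alt
  rw [isDoubleStringGo_eq text.toList 0 0 le_rfl (by norm_num) le_rfl (by norm_num)]
  simp only [PySem.Str.count_eq,
    show ("e" : String).toList = ['e'] from rfl, show ("E" : String).toList = ['E'] from rfl,
    show ("." : String).toList = ['.'] from rfl, chars_count_single]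
  have hall : text.toList.all (fun c => PySem.Chars.isdigit c || PySem.Chars.isIn [c] "eE.+-".toList)
      = text.toList.all (fun c => PySem.Chars.isdigit c ||
          (c = 'e' ∨ c = 'E' ∨ c = '.' ∨ c = '+' ∨ c = '-')) := by
    exact congrArg text.toList.all (funext isIn_singleton_special)
  rw [hall]
  split_ifs with h1 h2
  · have hf : decide ((0:Int) + ↑(text.toList.count 'e') + ↑(text.toList.count 'E') ≤ 1) = false := by
      rw [decide_eq_false_iff_not]; push_cast; omega
    rw [hf, Bool.false_and, Bool.false_and]
  · have ht : decide ((0:Int) + ↑(text.toList.count 'e') + ↑(text.toList.count 'E') ≤ 1) = true :=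
      decide_eq_true (by push_cast; omega)
    have hf : decide ((0:Int) + ↑(text.toList.count '.') ≤ 1) = false := by
      rw [decide_eq_false_iff_not]; push_cast; omega
    rw [ht, hf, Bool.true_and, Bool.false_and]
  · have ht : decide ((0:Int) + ↑(text.toList.count 'e') + ↑(text.toList.count 'E') ≤ 1) = true :=
      decide_eq_true (by push_cast; omega)
    have ht2 : decide ((0:Int) + ↑(text.toList.count '.') ≤ 1) = true :=
      decide_eq_true (by push_cast; omega)
    rw [ht, ht2, Bool.true_and, Bool.true_and]
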